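-- pv_equiv track=rewrite | github.com/mcw-anesthesiology/residentprogram | resources/scripts/plot_scenarios_vs_subcompetencies.py | parse_header
-- ===== SOURCE A (Python) =====
-- def parse_header(row):
--     scenarios = []
--     subcompetencies = []
--
--     for name in row.keys():
--         if name.endswith("bas") or name.endswith("adv"):
--             scenarios.append(name)
--         elif len(scenarios) > 0:
--             subcompetencies.append(name)
--
--     return scenarios, subcompetencies
-- ===== SOURCE B (Python) =====
-- from itertools import dropwhile
--
-- def parse_header(row):
--     def is_scen(k):
--         return k.endswith("bas") or k.endswith("adv")
--     keys = list(row.keys())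
--     scenarios = [k for k in keys if is_scen(k)]
--     tail = list(dropwhile(lambda k: not is_scen(k), keys))
--     subcompetencies = [k for k in tail if not is_scen(k)]
--     return scenarios, subcompetencies
-- ===== Notes on version B (the rewrite author's own statement) =====
-- stated objective: simpler
-- what changed: Replaces A's single stateful accumulating loop with two stateless passes: a filter for scenario keys and a dropwhile-anchored suffix filter for subcompetencies.
import Mathlib
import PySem

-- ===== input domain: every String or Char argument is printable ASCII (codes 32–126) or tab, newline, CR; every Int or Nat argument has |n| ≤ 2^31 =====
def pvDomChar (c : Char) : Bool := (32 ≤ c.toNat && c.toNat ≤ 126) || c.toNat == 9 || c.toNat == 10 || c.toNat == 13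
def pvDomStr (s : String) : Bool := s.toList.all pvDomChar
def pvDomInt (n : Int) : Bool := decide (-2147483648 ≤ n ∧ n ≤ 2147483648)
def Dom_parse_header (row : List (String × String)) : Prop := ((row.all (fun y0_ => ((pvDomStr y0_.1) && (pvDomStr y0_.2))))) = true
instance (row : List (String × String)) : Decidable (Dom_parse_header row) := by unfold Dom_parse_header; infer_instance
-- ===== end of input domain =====

-- B replaces A's single stateful loop by a filter pass plus a dropwhile-anchored suffix filter (simpler, same cost).


-- ===== PORT A =====
-- name.endswith("bas") or name.endswith("adv")
def pvIsScen (name : String) : Bool :=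
  PySem.Str.endswith name "bas" || PySem.Str.endswith name "adv"

-- A: one loop over the keys carrying the pair (scenarios, subcompetencies)
def parse_header (row : List (String × String)) : List String × List String :=
  (row.map Prod.fst).foldl
    (fun (st : List String × List String) name =>
      if pvIsScen name then (st.1 ++ [name], st.2)
      else if st.1.length > 0 then (st.1, st.2 ++ [name])
      else st)
    ([], [])

-- ===== PORT B =====
-- B: filter pass for scenarios; dropwhile to the first scenario, then filter the tail
def parse_header_alt (row : List (String × String)) : List String × List String :=
  let keys := row.map Prod.fst
  (keys.filter (fun k => pvIsScen k),
   (keys.dropWhile (fun k => !pvIsScen k)).filter (fun k => !pvIsScen k))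

-- ===== PRECONDITION & SPEC =====
def Spec_parse_header (row : List (String × String)) (out : List String × List String) : Prop := out = parse_header_alt row
instance (row : List (String × String)) (out : List String × List String) : Decidable (Spec_parse_header row out) := by unfold Spec_parse_header; infer_instance

-- ===== CLAIM (what is proved, stated in full; the proofs are below) =====
def Claim_equal_parse_header : Prop := ∀ (row : List (String × String)), Dom_parse_header row → Spec_parse_header row (parse_header row)

-- ===== LEMMAS AND PROOFS =====

-- Once a scenario has been seen (first component nonempty), A's loop appends filters.
theorem pv_fold_nonempty (ks : List String) (s ss : List String) (hs : s ≠ []) :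
    ks.foldl
      (fun (st : List String × List String) name =>
        if pvIsScen name then (st.1 ++ [name], st.2)
        else if st.1.length > 0 then (st.1, st.2 ++ [name])
        else st)
      (s, ss)
    = (s ++ ks.filter (fun k => pvIsScen k), ss ++ ks.filter (fun k => !pvIsScen k)) := by
  induction ks generalizing s ss with
  | nil => simp
  | cons k t ih =>
    simp only [List.foldl_cons]
    by_cases h : pvIsScen k = true
    · simp only [h, if_true]
      rw [ih (s ++ [k]) ss (by simp)]
      simp [h]
    · have hlen : s.length > 0 := List.length_pos_of_ne_nil hs
      rw [Bool.not_eq_true] at h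
      simp only [h, Bool.false_eq_true, if_false, gt_iff_lt, if_pos hlen]
      rw [ih s (ss ++ [k]) hs]
      simp [h]

-- From the empty state, A's fold equals B's two passes.
theorem pv_fold_empty (ks : List String) :
    ks.foldl
      (fun (st : List String × List String) name =>
        if pvIsScen name then (st.1 ++ [name], st.2)
        else if st.1.length > 0 then (st.1, st.2 ++ [name])
        else st)
      ([], [])
    = (ks.filter (fun k => pvIsScen k),
       (ks.dropWhile (fun k => !pvIsScen k)).filter (fun k => !pvIsScen k)) := by
  induction ks with
  | nil => simp
  | cons k t ih =>
    simp only [List.foldl_cons]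
    by_cases h : pvIsScen k = true
    · simp only [h, if_true]
      rw [List.nil_append, pv_fold_nonempty t [k] [] (by simp)]
      simp [List.dropWhile_cons, h, List.filter_cons]
    · rw [Bool.not_eq_true] at h
      simp only [h, Bool.false_eq_true, if_false, List.length_nil, gt_iff_lt,
        lt_irrefl, if_false]
      rw [ih]
      simp [List.dropWhile_cons, h, List.filter_cons]

-- ===== VERDICT (by name: the statement is the Claim_ definition above) =====
theorem parse_header_spec : Claim_equal_parse_header := by
  intro row _
  unfold Spec_parse_header parse_header parse_header_alt
  exact pv_fold_empty (row.map Prod.fst)
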